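-- pv_equiv track=rewrite | github.com/marioahn/Algorithm-programmers-and-baekjoon | 프로그래머스/1/159994. 카드 뭉치/카드 뭉치.py | solution
-- ===== SOURCE A (Python) =====
-- def solution(cards1, cards2, goal):
--
--     # 아래처럼 0 안 넣어주면, 아래 사례에서 cards2가 길이가 0이되고,
--         # elif문에서 cards2[0] -> list index out of range에러가 발생
--     cards1.append(0)
--     cards2.append(0)
--
--     for k in range(len(goal)):
--         if goal[k] == cards1[0]:
--             cards1.pop(0)
--         elif goal[k] == cards2[0]:
--             cards2.pop(0)
--         else:
--             return 'No'
--
--     return 'Yes'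
-- ===== SOURCE B (Python) =====
-- def solution(cards1, cards2, goal):
--     i = j = 0
--     for g in goal:
--         if i < len(cards1) and g == cards1[i]:
--             i += 1
--         elif j < len(cards2) and g == cards2[j]:
--             j += 1
--         else:
--             return 'No'
--     return 'Yes'
-- ===== Notes on version B (the rewrite author's own statement) =====
-- stated objective: faster
-- what changed: Replaces A's destructive pop(0) (O(n) list shifts, plus sentinel appends mutating the inputs) with two advancing index pointers over the unmodified lists, in one pass.
import Mathlib
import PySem

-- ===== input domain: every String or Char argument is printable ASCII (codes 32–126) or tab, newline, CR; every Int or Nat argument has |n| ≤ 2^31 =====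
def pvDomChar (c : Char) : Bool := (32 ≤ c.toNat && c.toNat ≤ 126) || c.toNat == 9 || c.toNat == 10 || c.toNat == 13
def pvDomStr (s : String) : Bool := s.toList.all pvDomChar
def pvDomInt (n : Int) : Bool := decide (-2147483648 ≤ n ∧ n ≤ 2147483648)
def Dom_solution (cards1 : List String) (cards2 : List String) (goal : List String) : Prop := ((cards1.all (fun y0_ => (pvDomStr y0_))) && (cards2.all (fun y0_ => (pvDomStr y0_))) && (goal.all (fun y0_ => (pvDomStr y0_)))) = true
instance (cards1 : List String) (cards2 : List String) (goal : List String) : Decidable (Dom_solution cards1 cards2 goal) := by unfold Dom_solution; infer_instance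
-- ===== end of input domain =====

-- B replaces A's destructive pop(0) with two index pointers over the unmodified lists (one O(n) pass);
-- A mutates cards1/cards2 in place (appends a sentinel, pops matched fronts) — only the RETURN value is claimed equal.

-- ===== PORT A =====
-- A appends the int 0 as a sentinel to each list; since goal holds strings, 'goal[k] == 0' is always
-- False in Python, so the sentinel is modelled exactly by headMatchA returning false on the
-- exhausted (sentinel-only) list; pop(0) on the sentinel list is never reached.
def headMatchA (g : String) : List String → Bool
  | [] => false
  | x :: _ => g == x

def loopA : List String → List String → List String → String
  | [], _, _ => "Yes"
  | g :: gs, c1, c2 =>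
    if headMatchA g c1 then loopA gs c1.tail c2
    else if headMatchA g c2 then loopA gs c1 c2.tail
    else "No"

def solution (cards1 : List String) (cards2 : List String) (goal : List String) : String :=
  loopA goal cards1 cards2

-- ===== PORT B =====
def idxMatchB (g : String) (xs : List String) (i : Nat) : Bool :=
  match xs[i]? with
  | some x => g == x
  | none => false

def loopB (cards1 cards2 : List String) : List String → Nat → Nat → String
  | [], _, _ => "Yes"
  | g :: gs, i, j =>
    if idxMatchB g cards1 i then loopB cards1 cards2 gs (i + 1) j
    else if idxMatchB g cards2 j then loopB cards1 cards2 gs i (j + 1)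
    else "No"

def solution_alt (cards1 : List String) (cards2 : List String) (goal : List String) : String :=
  loopB cards1 cards2 goal 0 0

-- ===== PRECONDITION & SPEC =====
def Spec_solution (cards1 : List String) (cards2 : List String) (goal : List String) (out : String) : Prop := out = solution_alt cards1 cards2 goal
instance (cards1 : List String) (cards2 : List String) (goal : List String) (out : String) : Decidable (Spec_solution cards1 cards2 goal out) := by unfold Spec_solution; infer_instance

-- ===== CLAIM (what is proved, stated in full; the proofs are below) =====
def Claim_equal_solution : Prop := ∀ (cards1 : List String) (cards2 : List String) (goal : List String), Dom_solution cards1 cards2 goal → Spec_solution cards1 cards2 goal (solution cards1 cards2 goal)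

-- ===== LEMMAS AND PROOFS =====

-- ===== VERDICT (by name: the statement is the Claim_ definition above) =====
lemma headMatch_drop (g : String) (xs : List String) (i : Nat) :
    headMatchA g (xs.drop i) = idxMatchB g xs i := by
  unfold idxMatchB
  by_cases h : i < xs.length
  · rw [List.drop_eq_getElem_cons h]
    simp [headMatchA, List.getElem?_eq_getElem h]
  · rw [List.drop_eq_nil_of_le (le_of_not_gt h), List.getElem?_eq_none (le_of_not_gt h)]
    rfl

lemma loop_agree (cards1 cards2 : List String) (gs : List String) (i j : Nat) :
    loopA gs (cards1.drop i) (cards2.drop j) = loopB cards1 cards2 gs i j := by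
  induction gs generalizing i j with
  | nil => rfl
  | cons g gs ih =>
    simp only [loopA, loopB, headMatch_drop]
    by_cases h1 : idxMatchB g cards1 i
    · simpa [h1, List.tail_drop] using ih (i + 1) j
    · by_cases h2 : idxMatchB g cards2 j
      · simpa [h1, h2, List.tail_drop] using ih i (j + 1)
      · simp [h1, h2]

-- ===== VERDICT (by name: the statement is the Claim_ definition above) =====
theorem solution_spec : Claim_equal_solution := by
  intro cards1 cards2 goal _
  unfold Spec_solution solution solution_alt
  simpa using loop_agree cards1 cards2 goal 0 0
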